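-- pv_equiv track=rewrite | github.com/pypi-data/pypi-mirror-385 | packages/sapiens-transformers/sapiens_transformers-1.8.8-py3-none-any.whl/sapiens_transformers/models/nougat/tokenization_nougat_fast.py | truncate_repetitions
-- ===== SOURCE A (Python) =====
-- def find_next_punctuation(text: str, start_idx=0):
--     for i in range(start_idx, len(text)):
--         if text[i] in [".", "?", "!", "\n"]: return i
--     return None
--
-- def truncate_repetitions(text: str, min_len: int = 30) -> str:
--     text_lower = text.lower()
--     text_length = len(text_lower)
--     if text_length < 2 * min_len: return text
--     max_repetition_length = None
--     for repetition_length in range(min_len, int(text_length / 2)):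
--         same = True
--         for i in range(0, repetition_length):
--             if text_lower[text_length - repetition_length - i - 1] != text_lower[text_length - i - 1]:
--                 same = False
--                 break
--         if same: max_repetition_length = repetition_length
--     if max_repetition_length is None: return text
--     lcs = text_lower[-max_repetition_length:]
--     substituted_text = text
--     substituted_text_lower = text_lower
--     while substituted_text_lower.endswith(lcs):
--         substituted_text = substituted_text[:-max_repetition_length]
--         substituted_text_lower = substituted_text_lower[:-max_repetition_length]
--     repeating_tail = text_lower[len(substituted_text_lower) :]
--     substituted_text_lower_out = substituted_text_lower
--     while True:
--         sentence_end = find_next_punctuation(text_lower, len(substituted_text_lower_out))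
--         sentence_start = find_next_punctuation(text_lower[::-1], len(substituted_text_lower_out))
--         if sentence_end and sentence_start:
--             sentence = text_lower[sentence_start:sentence_end]
--             substituted_text_lower_out = text_lower[: sentence_end + 1]
--             if sentence in repeating_tail: break
--         else: break
--     text_out = text[: len(substituted_text_lower_out)]
--     return text_out
-- ===== SOURCE B (Python) =====
-- def find_next_punctuation(text: str, start_idx=0):
--     for i in range(start_idx, len(text)):
--         if text[i] in [".", "?", "!", "\n"]:
--             return i
--     return None
--
-- def truncate_repetitions(text: str, min_len: int = 30) -> str:
--     tl = text.lower()
--     n = len(tl)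
--     if n < 2 * min_len:
--         return text
--     rs = tl[::-1]
--     # Z-function of the reversed text: z[i] = length of the longest common prefix of rs and rs[i:]
--     z = [0] * n
--     l = r = 0
--     for i in range(1, n):
--         k = min(r - i, z[i - l]) if i < r else 0
--         while i + k < n and rs[k] == rs[i + k]:
--             k += 1
--         z[i] = k
--         if i + k > r:
--             l, r = i, i + k
--     # the text ends with a doubled block of length L  iff  z[L] >= L; take the largest such L
--     max_rep = None
--     for L in reversed(range(min_len, n // 2)):
--         if z[L] >= L:
--             max_rep = L
--             break
--     if max_rep is None:
--         return text
--     # count the whole trailing copies of the block and cut them all off at once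
--     copies = 1
--     while (copies + 1) * max_rep <= n and tl[n - (copies + 1) * max_rep : n - copies * max_rep] == tl[n - max_rep:]:
--         copies += 1
--     cut = n - copies * max_rep
--     repeating_tail = tl[cut:]
--     out_len = cut
--     while True:
--         sentence_end = find_next_punctuation(tl, out_len)
--         sentence_start = find_next_punctuation(rs, out_len)
--         if sentence_end and sentence_start:
--             sentence = tl[sentence_start:sentence_end]
--             out_len = sentence_end + 1
--             if sentence in repeating_tail:
--                 break
--         else:
--             break
--     return text[:out_len]
-- ===== Notes on version B (the rewrite author's own statement) =====
-- stated objective: alternative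
-- what changed: A different algorithm: a Z-function of the reversed text replaces the nested character-by-character doubled-suffix scan (largest L with z[L] >= L, scanned from above), the trailing copies of the block are removed by counting whole blocks instead of repeatedly re-slicing the string, and the reversed text for the sentence loop is computed once.
-- outside the precondition, e.g. on truncate_repetitions('ab', 0): A returns '', B does not finish within the time limit; on truncate_repetitions('', -1): A does not finish within the time limit, B raises IndexError
import Mathlib
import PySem

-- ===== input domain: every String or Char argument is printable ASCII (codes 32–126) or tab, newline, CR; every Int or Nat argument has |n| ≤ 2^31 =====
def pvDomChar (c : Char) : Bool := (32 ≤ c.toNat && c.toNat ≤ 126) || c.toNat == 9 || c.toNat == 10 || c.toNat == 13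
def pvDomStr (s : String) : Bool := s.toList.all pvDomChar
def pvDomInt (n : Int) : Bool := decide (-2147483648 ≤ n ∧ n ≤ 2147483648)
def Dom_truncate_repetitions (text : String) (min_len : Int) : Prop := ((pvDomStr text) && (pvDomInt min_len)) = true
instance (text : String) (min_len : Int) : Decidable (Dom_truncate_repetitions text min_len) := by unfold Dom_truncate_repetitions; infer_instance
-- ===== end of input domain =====

-- B finds the repeated suffix block with a Z-function of the reversed text instead of A's nested
-- doubled-suffix scan, and cuts all whole trailing copies of the block at once (objective: alternative).

-- ===== PORT A =====
-- `c in [".", "?", "!", "\n"]`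
def pvPunct (c : Char) : Bool := c == '.' || c == '?' || c == '!' || c == '\n'

-- find_next_punctuation (Source A and Source B define this helper identically): first index ≥ start holding
-- a punctuation character, None if there is none
def pvFnp (t : List Char) (start : Int) : Option Int :=
  (PySem.List.pyRange start (t.length : Int) 1).find? (fun i => pvPunct (PySem.List.pyGetD t i ' '))

-- inner `for i in range(0, repetition_length)` with break: all compared characters match
def pvSameA (tl : List Char) (n L : Int) : Bool :=
  (PySem.List.pyRange 0 L 1).all (fun i =>
    PySem.List.pyGetD tl (n - L - i - 1) ' ' == PySem.List.pyGetD tl (n - i - 1) ' ')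

-- outer loop keeping the LAST successful repetition_length
def pvMaxRepA (tl : List Char) (n m : Int) : Option Int :=
  (PySem.List.pyRange m (PySem.Int.floordiv n 2) 1).foldl
    (fun acc L => if pvSameA tl n L then some L else acc) none

-- `while substituted_text_lower.endswith(lcs): … = …[:-max_repetition_length]`
-- (fuel only totalizes the loop; it is never exhausted when 1 ≤ M)
def pvStripA (M : Int) (lcs : List Char) : Nat → List Char × List Char → List Char × List Char
  | 0, st => st
  | fuel + 1, (st, stl) =>
    if PySem.Chars.endswith stl lcs then
      pvStripA M lcs fuel
        (PySem.List.slice st none (some (-M)), PySem.List.slice stl none (some (-M)))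
    else (st, stl)

-- final `while True` sentence loop; `text_lower[::-1]` is tl.reverse (PySem.List.slice?_none_none_neg_one);
-- `if sentence_end and sentence_start` is Python truthiness: both non-None AND both nonzero
def pvSentA (tl repTail : List Char) : Nat → List Char → List Char
  | 0, cur => cur
  | fuel + 1, cur =>
    match pvFnp tl (cur.length : Int), pvFnp tl.reverse (cur.length : Int) with
    | some e, some s =>
      if e ≠ 0 ∧ s ≠ 0 then
        let sentence := PySem.List.slice tl (some s) (some e)
        let cur' := PySem.List.slice tl none (some (e + 1))
        if PySem.Chars.isIn sentence repTail then cur' else pvSentA tl repTail fuel cur'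
      else cur
    | _, _ => cur

def truncate_repetitions (text : String) (min_len : Int) : String :=
  let tx := text.toList
  let tl := PySem.Chars.lower tx
  let n : Int := (tl.length : Int)
  if n < 2 * min_len then text
  else
    match pvMaxRepA tl n min_len with
    | none => text
    | some M =>
      let lcs := PySem.List.slice tl (some (-M)) none
      let stl := (pvStripA M lcs (tl.length + 1) (tx, tl)).2
      let repTail := PySem.List.slice tl (some (stl.length : Int)) none
      let outLow := pvSentA tl repTail (tl.length + 1) stl
      String.ofList (PySem.List.slice tx none (some (outLow.length : Int)))

-- ===== PORT B =====
-- `while i + k < n and rs[k] == rs[i+k]: k += 1`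
def pvZext (rs : List Char) (n i : Int) : Nat → Int → Int
  | 0, k => k
  | fuel + 1, k =>
    if i + k < n ∧ PySem.List.pyGetD rs k ' ' = PySem.List.pyGetD rs (i + k) ' ' then
      pvZext rs n i fuel (k + 1)
    else k

-- one iteration of Source B's Z loop body on the state (z, l, r)
def pvZstep (rs : List Char) (n : Int) (st : List Int × Int × Int) (i : Int) :
    List Int × Int × Int :=
  let z := st.1
  let l := st.2.1
  let r := st.2.2
  let k0 : Int := if i < r then min (r - i) (PySem.List.pyGetD z (i - l) 0) else 0
  let k := pvZext rs n i (rs.length + 1) k0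
  let z' := PySem.List.pySetD z i k
  if i + k > r then (z', i, i + k) else (z', l, r)

-- `z = [0] * n` then `for i in range(1, n): …`
def pvZarr (rs : List Char) (n : Int) : List Int :=
  ((PySem.List.pyRange 1 n 1).foldl (pvZstep rs n) (PySem.List.pyRepeat [0] n, 0, 0)).1

-- `while (copies+1)*max_rep <= n and tl[n-(copies+1)*max_rep : n-copies*max_rep] == tl[n-max_rep:]`
def pvCopiesB (tl : List Char) (n M : Int) : Nat → Int → Int
  | 0, c => c
  | fuel + 1, c =>
    if (c + 1) * M ≤ n ∧
        PySem.List.slice tl (some (n - (c + 1) * M)) (some (n - c * M))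
          = PySem.List.slice tl (some (n - M)) none then
      pvCopiesB tl n M fuel (c + 1)
    else c

-- Source B's sentence loop over the cut LENGTH, with the reversed text rs precomputed
def pvSentB (tl rs repTail : List Char) : Nat → Int → Int
  | 0, outLen => outLen
  | fuel + 1, outLen =>
    match pvFnp tl outLen, pvFnp rs outLen with
    | some e, some s =>
      if e ≠ 0 ∧ s ≠ 0 then
        let sentence := PySem.List.slice tl (some s) (some e)
        if PySem.Chars.isIn sentence repTail then e + 1
        else pvSentB tl rs repTail fuel (e + 1)
      else outLen
    | _, _ => outLen

def truncate_repetitions_alt (text : String) (min_len : Int) : String :=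
  let tx := text.toList
  let tl := PySem.Chars.lower tx
  let n : Int := (tl.length : Int)
  if n < 2 * min_len then text
  else
    let rs := tl.reverse        -- tl[::-1]
    let z := pvZarr rs n
    -- `for L in reversed(range(min_len, n // 2)): if z[L] >= L: break`
    match ((PySem.List.pyRange min_len (PySem.Int.floordiv n 2) 1).reverse).find?
        (fun L => decide (L ≤ PySem.List.pyGetD z L 0)) with
    | none => text
    | some M =>
      let copies := pvCopiesB tl n M (tl.length + 1) 1
      let cut := n - copies * M
      let repTail := PySem.List.slice tl (some cut) none
      let outLen := pvSentB tl rs repTail (tl.length + 1) cut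
      String.ofList (PySem.List.slice tx none (some outLen))

-- ===== PRECONDITION & SPEC =====
-- Pre_ excludes min_len ≤ 0 only: there the "repetition" lengths of A's search degenerate to 0 or
-- negative values and neither loop is meaningful — A even loops forever on e.g. ("", -1), and B's
-- natural block arithmetic loops on e.g. ("ab", 0), where A happens to return "".
def Pre_truncate_repetitions (text : String) (min_len : Int) : Prop := 1 ≤ min_len
instance (text : String) (min_len : Int) : Decidable (Pre_truncate_repetitions text min_len) := by
  unfold Pre_truncate_repetitions; infer_instance

def pvWitness_truncate_repetitions : String × Int := ("an example. ha! ha! ha! ha! ", 3)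

def Spec_truncate_repetitions (text : String) (min_len : Int) (out : String) : Prop :=
  out = truncate_repetitions_alt text min_len
instance (text : String) (min_len : Int) (out : String) :
    Decidable (Spec_truncate_repetitions text min_len out) := by
  unfold Spec_truncate_repetitions; infer_instance

-- ===== CLAIM (what is proved, stated in full; the proofs are below) =====
def Claim_equal_truncate_repetitions : Prop := ∀ (text : String) (min_len : Int), Dom_truncate_repetitions text min_len → Pre_truncate_repetitions text min_len → Spec_truncate_repetitions text min_len (truncate_repetitions text min_len)

-- ===== LEMMAS AND PROOFS =====

def pvLcp : List Char → List Char → Nat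
  | a :: as, b :: bs => if a = b then pvLcp as bs + 1 else 0
  | _, _ => 0

theorem pvLcp_nil_right (a : List Char) : pvLcp a [] = 0 := by cases a <;> rfl

theorem pvLcp_le_left : ∀ a b : List Char, pvLcp a b ≤ a.length
  | [], b => by cases b <;> simp [pvLcp]
  | a :: as, [] => by simp [pvLcp]
  | a :: as, b :: bs => by
    by_cases h : a = b
    · simpa [pvLcp, h, Nat.succ_le_succ_iff] using pvLcp_le_left as bs
    · simp [pvLcp, h]

theorem pvLcp_le_right : ∀ a b : List Char, pvLcp a b ≤ b.length
  | [], b => by cases b <;> simp [pvLcp]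
  | a :: as, [] => by simp [pvLcp]
  | a :: as, b :: bs => by
    by_cases h : a = b
    · simpa [pvLcp, h, Nat.succ_le_succ_iff] using pvLcp_le_right as bs
    · simp [pvLcp, h]

theorem pvLcp_take : ∀ a b : List Char, a.take (pvLcp a b) = b.take (pvLcp a b)
  | [], b => by cases b <;> simp [pvLcp]
  | a :: as, [] => by simp [pvLcp]
  | a :: as, b :: bs => by
    by_cases h : a = b
    · simp [pvLcp, h, pvLcp_take as bs]
    · simp [pvLcp, h]

theorem pvLcp_split : ∀ (k : Nat) (a b : List Char), a.take k = b.take k →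
    k ≤ a.length → k ≤ b.length → pvLcp a b = k + pvLcp (a.drop k) (b.drop k) := by
  intro k
  induction k with
  | zero => simp
  | succ k ih =>
    intro a b ht ha hb
    match a, b with
    | a :: as, b :: bs =>
      simp only [List.take_succ_cons, List.cons.injEq] at ht
      simp only [List.length_cons, Nat.succ_le_succ_iff] at ha hb
      simp [pvLcp, ht.1, ih as bs ht.2 ha hb, List.drop_succ_cons]
      omega

theorem pvLcp_ge_iff (k : Nat) (a b : List Char) :
    k ≤ pvLcp a b ↔ k ≤ a.length ∧ k ≤ b.length ∧ a.take k = b.take k := by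
  constructor
  · intro h
    refine ⟨h.trans (pvLcp_le_left a b), h.trans (pvLcp_le_right a b), ?_⟩
    have := pvLcp_take a b
    calc a.take k = (a.take (pvLcp a b)).take k := by rw [List.take_take, Nat.min_eq_left h]
    _ = (b.take (pvLcp a b)).take k := by rw [this]
    _ = b.take k := by rw [List.take_take, Nat.min_eq_left h]
  · rintro ⟨h1, h2, h3⟩
    rw [pvLcp_split k a b h3 h1 h2]
    omega

def pvZ (s : List Char) (j : Nat) : Nat := pvLcp s (s.drop j)

-- generic invariant rule for a fold over range(a, b)
theorem pvFoldlRangeInv {σ : Type} (f : σ → Int → σ) (P : Int → σ → Prop) (b : Int) :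
    ∀ (n : Nat) (a : Int) (st : σ), (b - a).toNat = n → a ≤ b → P a st →
      (∀ (i : Int) (s : σ), a ≤ i → i < b → P i s → P (i + 1) (f s i)) →
      P b ((PySem.List.pyRange a b 1).foldl f st) := by
  intro n
  induction n with
  | zero =>
    intro a st h0 hab hP _
    have : b = a := by omega
    subst this
    rw [PySem.List.pyRange_one_eq_nil le_rfl]
    exact hP
  | succ n ih =>
    intro a st h0 hab hP hstep
    have hlt : a < b := by omega
    rw [PySem.List.pyRange_one_cons hlt]
    simp only [List.foldl_cons]
    exact ih (a + 1) (f st a) (by omega) (by omega) (hstep a st le_rfl hlt hP)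
      (fun i s h1 h2 hp => hstep i s (by omega) h2 hp)

theorem pvZext_eq (s : List Char) (i0 : Nat) :
    ∀ (fuel k0 : Nat), s.length ≤ fuel + i0 + k0 →
      pvZext s (s.length : Int) (i0 : Int) fuel (k0 : Int)
        = ((k0 + pvLcp (s.drop k0) (s.drop (i0 + k0)) : Nat) : Int) := by
  intro fuel
  induction fuel with
  | zero =>
    intro k0 h
    have : s.drop (i0 + k0) = [] := List.drop_eq_nil_of_le (by omega)
    simp [pvZext, this, pvLcp_nil_right]
  | succ fuel ih =>
    intro k0 h
    by_cases hlt : i0 + k0 < s.length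
    · have hk0 : k0 < s.length := by omega
      have hcast : ((i0 : Int) + (k0 : Int)) = ((i0 + k0 : Nat) : Int) := by push_cast; ring
      have hdrop1 : s.drop k0 = s[k0] :: s.drop (k0 + 1) := (List.getElem_cons_drop ..).symm
      have hdrop2 : s.drop (i0 + k0) = s[i0 + k0] :: s.drop (i0 + k0 + 1) :=
        (List.getElem_cons_drop ..).symm
      by_cases hc : s[k0] = s[i0 + k0]
      · have : pvZext s (s.length : Int) (i0 : Int) (fuel + 1) (k0 : Int)
            = pvZext s (s.length : Int) (i0 : Int) fuel ((k0 : Int) + 1) := by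
          rw [pvZext]
          rw [if_pos]
          refine ⟨by exact_mod_cast hlt, ?_⟩
          rw [hcast, PySem.List.pyGetD_natCast, PySem.List.pyGetD_natCast,
            List.getD_eq_getElem s ' ' hk0, List.getD_eq_getElem s ' ' hlt]
          exact hc
        rw [this]
        have : ((k0 : Int) + 1) = ((k0 + 1 : Nat) : Int) := by push_cast; ring
        rw [this, ih (k0 + 1) (by omega)]
        have hassoc : i0 + (k0 + 1) = i0 + k0 + 1 := by omega
        rw [hassoc, hdrop1, hdrop2]
        simp only [pvLcp, if_pos hc]
        congr 1
        omega
      · rw [pvZext, if_neg, hdrop1, hdrop2]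
        · simp only [pvLcp, if_neg hc, Nat.add_zero]
        · rintro ⟨-, hEq⟩
          apply hc
          rw [hcast, PySem.List.pyGetD_natCast, PySem.List.pyGetD_natCast,
            List.getD_eq_getElem s ' ' hk0, List.getD_eq_getElem s ' ' hlt] at hEq
          exact hEq
    · have hnil : s.drop (i0 + k0) = [] := List.drop_eq_nil_of_le (by omega)
      rw [pvZext, if_neg, hnil, pvLcp_nil_right]
      · omega
      · rintro ⟨hEq, -⟩
        exact hlt (by exact_mod_cast hEq)

def pvZinv (s : List Char) (i : Nat) (st : List Int × Int × Int) : Prop :=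
  st.1.length = s.length ∧
  (∀ j : Nat, 1 ≤ j → j < i → PySem.List.pyGetD st.1 (j : Int) 0 = (pvZ s j : Int)) ∧
  ∃ ln rn : Nat, st.2.1 = (ln : Int) ∧ st.2.2 = (rn : Int) ∧ ln < i ∧
    rn ≤ ln + pvZ s ln ∧ (rn ≠ 0 → 1 ≤ ln)

-- inside the Z box, a candidate k0 is a verified common prefix of s and s.drop i
theorem pvBox (s : List Char) (i ln rn k0 : Nat)
    (hli : ln < i) (hir : i < rn) (hbox : rn ≤ ln + pvZ s ln)
    (hk1 : k0 ≤ rn - i) (hk2 : k0 ≤ pvZ s (i - ln)) :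
    s.take k0 = (s.drop i).take k0 ∧ k0 ≤ s.length - i := by
  have hzl : pvZ s ln ≤ s.length - ln := by
    have := pvLcp_le_right s (s.drop ln)
    simpa [pvZ, List.length_drop] using this
  have hrn : rn ≤ s.length := by omega
  constructor
  · -- step 3 first: take k0 s = take k0 (s.drop (i - ln))
    have h3 : s.take k0 = (s.drop (i - ln)).take k0 := by
      have ht : List.take (pvZ s (i - ln)) s = List.take (pvZ s (i - ln)) (List.drop (i - ln) s) := pvLcp_take _ _
      calc s.take k0 = (s.take (pvZ s (i - ln))).take k0 := by
            rw [List.take_take, Nat.min_eq_left hk2]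
        _ = ((s.drop (i - ln)).take (pvZ s (i - ln))).take k0 := by rw [ht]
        _ = (s.drop (i - ln)).take k0 := by rw [List.take_take, Nat.min_eq_left hk2]
    -- step 1/2: take k0 (s.drop (i - ln)) = take k0 (s.drop i)
    have h12 : (s.drop (i - ln)).take k0 = (s.drop i).take k0 := by
      have hm : (i - ln) + k0 ≤ pvZ s ln := by omega
      have ht : List.take (pvZ s ln) s = List.take (pvZ s ln) (List.drop ln s) := pvLcp_take _ _
      have h1 : s.take ((i - ln) + k0) = (s.drop ln).take ((i - ln) + k0) := by
        calc s.take ((i - ln) + k0) = (s.take (pvZ s ln)).take ((i - ln) + k0) := by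
              rw [List.take_take, Nat.min_eq_left hm]
          _ = ((s.drop ln).take (pvZ s ln)).take ((i - ln) + k0) := by rw [ht]
          _ = (s.drop ln).take ((i - ln) + k0) := by rw [List.take_take, Nat.min_eq_left hm]
      have h2 := congrArg (List.drop (i - ln)) h1
      rw [List.drop_take, List.drop_take, List.drop_drop] at h2
      have e1 : (i - ln) + k0 - (i - ln) = k0 := by omega
      have e2 : ln + (i - ln) = i := by omega
      rw [e1, e2] at h2
      exact h2
    rw [h3, h12]
  · omega

theorem pvZstep_inv (s : List Char) (i : Nat) (h1 : 1 ≤ i) (h2 : i < s.length)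
    (st : List Int × Int × Int) (hinv : pvZinv s i st) :
    pvZinv s (i + 1) (pvZstep s (s.length : Int) st (i : Int)) := by
  obtain ⟨hlen, hz, ln, rn, hl, hr, hlni, hbox, hpos⟩ := hinv
  -- the verified prefix length k0
  have hk0 : ∃ k0n : Nat,
      (if (i : Int) < st.2.2 then
          min (st.2.2 - (i : Int)) (PySem.List.pyGetD st.1 ((i : Int) - st.2.1) 0)
        else 0) = (k0n : Int) ∧
      s.take k0n = (s.drop i).take k0n ∧ k0n ≤ s.length - i := by
    by_cases hir : i < rn
    · have hln1 : 1 ≤ ln := hpos (by omega)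
      have hcast : ((i : Int) - st.2.1) = ((i - ln : Nat) : Int) := by
        rw [hl]; omega
      have hj1 : 1 ≤ i - ln := by omega
      have hj2 : i - ln < i := by omega
      have hread : PySem.List.pyGetD st.1 ((i : Int) - st.2.1) 0 = (pvZ s (i - ln) : Int) := by
        rw [hcast]; exact hz (i - ln) hj1 hj2
      refine ⟨min (rn - i) (pvZ s (i - ln)), ?_, ?_⟩
      · rw [if_pos (by rw [hr]; exact_mod_cast hir), hread, hr]
        push_cast [Nat.cast_min]
        omega
      · exact pvBox s i ln rn _ hlni hir hbox (Nat.min_le_left _ _) (Nat.min_le_right _ _)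
    · refine ⟨0, ?_, by simp, by omega⟩
      rw [if_neg]
      · rfl
      · rw [hr]; exact_mod_cast hir
  obtain ⟨k0n, hk0eq, hk0take, hk0le⟩ := hk0
  -- the extension computes pvZ s i
  have hk : pvZext s (s.length : Int) (i : Int) (s.length + 1) (k0n : Int) = (pvZ s i : Int) := by
    rw [pvZext_eq s i (s.length + 1) k0n (by omega)]
    congr 1
    have hfact : List.drop k0n (List.drop i s) = List.drop (i + k0n) s := by
      rw [List.drop_drop]
      try rw [Nat.add_comm]
    have := pvLcp_split k0n s (s.drop i) hk0take (by omega) (by simp [List.length_drop]; omega)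
    rw [hfact] at this
    exact (this).symm
  -- now push through pvZstep
  unfold pvZstep
  simp only [hk0eq, hk]
  have hset : ∀ j : Nat, PySem.List.pyGetD (PySem.List.pySetD st.1 (i : Int) (pvZ s i : Int)) (j : Int) 0
      = if j = i then (pvZ s i : Int) else PySem.List.pyGetD st.1 (j : Int) 0 := by
    intro j
    exact PySem.List.pyGetD_pySetD_natCast st.1 i j _ _ (by omega)
  have hzs : ∀ j : Nat, 1 ≤ j → j < i + 1 →
      PySem.List.pyGetD (PySem.List.pySetD st.1 (i : Int) (pvZ s i : Int)) (j : Int) 0 = (pvZ s j : Int) := by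
    intro j hj1 hj2
    rw [hset j]
    by_cases hji : j = i
    · rw [if_pos hji, hji]
    · rw [if_neg hji]; exact hz j hj1 (by omega)
  split
  · exact ⟨by simpa using hlen, hzs, i, i + pvZ s i, rfl, by push_cast; ring, by omega,
      le_refl _, fun _ => h1⟩
  · exact ⟨by simpa using hlen, hzs, ln, rn, hl, hr, by omega, hbox, hpos⟩

theorem pvZarr_spec (s : List Char) (j : Nat) (hj1 : 1 ≤ j) (hj2 : j < s.length) :
    PySem.List.pyGetD (pvZarr s (s.length : Int)) (j : Int) 0 = (pvZ s j : Int) := by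
  have hs1 : 1 ≤ s.length := by omega
  have hfinal := pvFoldlRangeInv (pvZstep s (s.length : Int))
      (fun i st => ∃ iN : Nat, i = (iN : Int) ∧ pvZinv s iN st) (s.length : Int)
      ((s.length : Int) - 1).toNat 1 (PySem.List.pyRepeat [0] (s.length : Int), 0, 0)
      rfl (by omega) ?_ ?_
  · obtain ⟨iN, hiN, hinv⟩ := hfinal
    have : iN = s.length := by exact_mod_cast hiN.symm
    subst this
    exact hinv.2.1 j hj1 hj2
  · refine ⟨1, rfl, ?_, ?_, 0, 0, rfl, rfl, by omega, by omega, by omega⟩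
    · rw [PySem.List.pyRepeat_singleton]
      simp
    · intro j h1 h2; omega
  · rintro i stx hi1 hi2 ⟨iN, rfl, hinv⟩
    have hiN1 : 1 ≤ iN := by exact_mod_cast hi1
    have hiN2 : iN < s.length := by exact_mod_cast hi2
    exact ⟨iN + 1, by push_cast; ring, pvZstep_inv s iN hiN1 hiN2 stx hinv⟩

theorem pvFoldlLast {α : Type} (p : α → Bool) : ∀ (xs : List α) (acc : Option α),
    xs.foldl (fun acc x => if p x then some x else acc) acc = (xs.reverse.find? p).or acc := by
  intro xs
  induction xs with
  | nil => intro acc; simp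
  | cons x xs ih =>
    intro acc
    simp only [List.foldl_cons, List.reverse_cons, List.find?_append, ih]
    cases hfind : xs.reverse.find? p <;> cases hp : p x <;>
      simp_all [List.find?]

theorem pvFindCongr {α : Type} (p q : α → Bool) : ∀ (xs : List α),
    (∀ x ∈ xs, p x = q x) → xs.find? p = xs.find? q := by
  intro xs
  induction xs with
  | nil => intro _; rfl
  | cons x xs ih =>
    intro h
    simp only [List.find?]
    rw [h x (by simp)]
    cases q x
    · exact ih (fun y hy => h y (by simp [hy]))
    · rfl

-- a length-L prefix matches the block after it iff the chars agree pointwise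
theorem pvTakeEqPointwise (l : List Char) (L : Nat) :
    l.take L = (l.drop L).take L ↔ ∀ iN : Nat, iN < L → l[iN]? = l[L + iN]? := by
  constructor
  · intro h iN hiN
    have := congrArg (fun t => t[iN]?) h
    simpa [List.getElem?_take, List.getElem?_drop, hiN] using this
  · intro h
    apply List.ext_getElem?
    intro i
    by_cases hi : i < L
    · simp only [List.getElem?_take, List.getElem?_drop, hi, if_pos]
      exact h i hi
    · simp [hi]

-- A's character-by-character suffix-square test is "z[L] ≥ L" on the reversed text
theorem pvSameA_iff (tl : List Char) (L : Nat) (h1 : 1 ≤ L) (h2 : 2 * L < tl.length) :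
    pvSameA tl (tl.length : Int) (L : Int) = decide (L ≤ pvZ tl.reverse L) := by
  have hrev : tl.reverse.length = tl.length := by simp
  have hpoint : ∀ iN : Nat, iN < L →
      ((PySem.List.pyGetD tl ((tl.length : Int) - L - iN - 1) ' '
        == PySem.List.pyGetD tl ((tl.length : Int) - iN - 1) ' ') = true
      ↔ tl.reverse[iN]? = tl.reverse[L + iN]?) := by
    intro iN hiN
    have c1 : ((tl.length : Int) - L - iN - 1) = ((tl.length - L - iN - 1 : Nat) : Int) := by
      omega
    have c2 : ((tl.length : Int) - iN - 1) = ((tl.length - iN - 1 : Nat) : Int) := by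
      omega
    rw [c1, c2, PySem.List.pyGetD_natCast, PySem.List.pyGetD_natCast,
      List.getD_eq_getElem tl ' ' (by omega), List.getD_eq_getElem tl ' ' (by omega),
      beq_iff_eq]
    rw [List.getElem?_reverse (by omega), List.getElem?_reverse (by omega)]
    have e1 : tl.length - 1 - iN = tl.length - iN - 1 := by omega
    have e2 : tl.length - 1 - (L + iN) = tl.length - L - iN - 1 := by omega
    rw [e1, e2, List.getElem?_eq_getElem (by omega), List.getElem?_eq_getElem (by omega)]
    constructor
    · intro h; rw [h]
    · intro h; exact (Option.some.inj h).symm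
  have key : (∀ i ∈ PySem.List.pyRange 0 (L : Int) 1,
      (PySem.List.pyGetD tl ((tl.length : Int) - L - i - 1) ' '
        == PySem.List.pyGetD tl ((tl.length : Int) - i - 1) ' ') = true)
      ↔ L ≤ pvZ tl.reverse L := by
    rw [pvZ, pvLcp_ge_iff]
    rw [pvTakeEqPointwise tl.reverse L]
    constructor
    · intro hall
      refine ⟨by omega, by simp only [List.length_drop, hrev]; omega, ?_⟩
      intro iN hiN
      exact (hpoint iN hiN).mp (hall (iN : Int) (by rw [PySem.List.mem_pyRange_one]; omega))
    · rintro ⟨-, -, hpw⟩ i hi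
      rw [PySem.List.mem_pyRange_one] at hi
      obtain ⟨iN, rfl⟩ : ∃ iN : Nat, i = (iN : Nat) := ⟨i.toNat, by omega⟩
      have hiN : iN < L := by exact_mod_cast hi.2
      exact (hpoint iN hiN).mpr (hpw iN hiN)
  by_cases hP : L ≤ pvZ tl.reverse L
  · rw [pvSameA, show (decide (L ≤ pvZ tl.reverse L)) = true by simp [hP], List.all_eq_true]
    exact fun i hi => key.mpr hP i hi
  · rw [pvSameA, show (decide (L ≤ pvZ tl.reverse L)) = false by simp [hP],
      ← Bool.not_eq_true, List.all_eq_true]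
    intro hall
    exact hP (key.mp hall)

theorem pvMaxRep_eq (tl : List Char) (m : Int) (hm : 1 ≤ m) :
    pvMaxRepA tl (tl.length : Int) m
      = ((PySem.List.pyRange m (PySem.Int.floordiv (tl.length : Int) 2) 1).reverse).find?
          (fun L => decide (L ≤ PySem.List.pyGetD (pvZarr tl.reverse (tl.length : Int)) L 0)) := by
  rw [pvMaxRepA, pvFoldlLast, Option.or_none]
  apply pvFindCongr
  intro L hL
  rw [List.mem_reverse, PySem.List.mem_pyRange_one] at hL
  have hfd : PySem.Int.floordiv (tl.length : Int) 2 = ((tl.length / 2 : Nat) : Int) := by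
    exact_mod_cast PySem.Int.floordiv_natCast tl.length 2
  obtain ⟨Ln, rfl⟩ : ∃ Ln : Nat, L = (Ln : Int) := ⟨L.toNat, by omega⟩
  have hLn1 : 1 ≤ Ln := by exact_mod_cast hm.trans hL.1
  have hLn2 : Ln < tl.length / 2 := by
    have := hL.2
    rw [hfd] at this
    exact_mod_cast this
  have h2L : 2 * Ln < tl.length := by omega
  rw [pvSameA_iff tl Ln hLn1 h2L]
  have hrev : tl.reverse.length = tl.length := by simp
  have hz : PySem.List.pyGetD (pvZarr tl.reverse (tl.length : Int)) (Ln : Int) 0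
      = (pvZ tl.reverse Ln : Int) := by
    rw [← hrev]
    exact pvZarr_spec tl.reverse Ln hLn1 (by omega)
  rw [hz]
  rw [show decide ((Ln : Int) ≤ (pvZ tl.reverse Ln : Int)) = decide (Ln ≤ pvZ tl.reverse Ln)
    from decide_eq_decide.mpr (by exact_mod_cast Iff.rfl)]

-- A's endswith test at strip state c equals B's block-comparison guard at count c
theorem pvStripGuard (tl : List Char) (Mn c : Nat) (hM : 1 ≤ Mn) (hMT : Mn ≤ tl.length)
    (hc : c * Mn ≤ tl.length) :
    (PySem.Chars.endswith (tl.take (tl.length - c * Mn)) (tl.drop (tl.length - Mn)) = true)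
    ↔ (((c : Int) + 1) * (Mn : Int) ≤ (tl.length : Int) ∧
       PySem.List.slice tl (some ((tl.length : Int) - ((c : Int) + 1) * (Mn : Int)))
           (some ((tl.length : Int) - (c : Int) * (Mn : Int)))
         = PySem.List.slice tl (some ((tl.length : Int) - (Mn : Int))) none) := by
  have hd1 : (c + 1) * Mn = c * Mn + Mn := by ring
  have hd2 : ((c : Int) + 1) * (Mn : Int) = ((c * Mn + Mn : Nat) : Int) := by push_cast; ring
  have hlcs : (tl.drop (tl.length - Mn)).length = Mn := by simp [List.length_drop]; omega
  have hXlen : (tl.take (tl.length - c * Mn)).length = tl.length - c * Mn := by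
    simp [List.length_take]
  have ca : ((tl.length : Int) - ((c : Int) + 1) * (Mn : Int))
      = ((tl.length - (c + 1) * Mn : Nat) : Int) ∨ ¬ (c * Mn + Mn ≤ tl.length) := by
    by_cases hle : c * Mn + Mn ≤ tl.length
    · left; rw [hd2]; push_cast; omega
    · right; exact hle
  rw [PySem.Chars.endswith_iff]
  constructor
  · intro hsuf
    have hle : Mn ≤ tl.length - c * Mn := by
      have := hsuf.length_le
      rw [hlcs, hXlen] at this
      exact this
    have hcc : c * Mn + Mn ≤ tl.length := by omega
    refine ⟨by rw [hd2]; exact_mod_cast hcc, ?_⟩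
    have heq := List.suffix_iff_eq_drop.mp hsuf
    rw [hXlen, hlcs, List.drop_take] at heq
    have e2 : tl.length - c * Mn - (tl.length - c * Mn - Mn) = Mn := by omega
    have e1 : tl.length - c * Mn - Mn = tl.length - (c + 1) * Mn := by omega
    rw [e2, e1] at heq
    have caa : ((tl.length : Int) - ((c : Int) + 1) * (Mn : Int))
        = ((tl.length - (c + 1) * Mn : Nat) : Int) := by rw [hd2]; push_cast; omega
    have cb : ((tl.length : Int) - (c : Int) * (Mn : Int))
        = ((tl.length - c * Mn : Nat) : Int) := by omega
    have cc : ((tl.length : Int) - (Mn : Int)) = ((tl.length - Mn : Nat) : Int) := by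
      omega
    rw [caa, cb, cc, PySem.List.slice_natCast, PySem.List.slice_from_natCast]
    have e3 : tl.length - c * Mn - (tl.length - (c + 1) * Mn) = Mn := by omega
    rw [e3, ← heq]
  · rintro ⟨hcc', hslice⟩
    have hcc : c * Mn + Mn ≤ tl.length := by
      rw [hd2] at hcc'
      exact_mod_cast hcc'
    have hle : Mn ≤ tl.length - c * Mn := by omega
    rw [List.suffix_iff_eq_drop, hXlen, hlcs, List.drop_take]
    have e2 : tl.length - c * Mn - (tl.length - c * Mn - Mn) = Mn := by omega
    have e1 : tl.length - c * Mn - Mn = tl.length - (c + 1) * Mn := by omega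
    rw [e2, e1]
    have caa : ((tl.length : Int) - ((c : Int) + 1) * (Mn : Int))
        = ((tl.length - (c + 1) * Mn : Nat) : Int) := by rw [hd2]; push_cast; omega
    have cb : ((tl.length : Int) - (c : Int) * (Mn : Int))
        = ((tl.length - c * Mn : Nat) : Int) := by omega
    have cc : ((tl.length : Int) - (Mn : Int)) = ((tl.length - Mn : Nat) : Int) := by
      omega
    rw [caa, cb, cc, PySem.List.slice_natCast, PySem.List.slice_from_natCast] at hslice
    have e3 : tl.length - c * Mn - (tl.length - (c + 1) * Mn) = Mn := by omega
    rw [e3] at hslice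
    rw [← hslice]

theorem pvStripCopies (tl : List Char) (Mn : Nat) (hM : 1 ≤ Mn) (hMT : Mn ≤ tl.length) :
    ∀ (fA fB c : Nat) (st : List Char), 1 ≤ c → c * Mn ≤ tl.length →
      tl.length ≤ fA + c → tl.length ≤ fB + c →
      (pvStripA (Mn : Int) (tl.drop (tl.length - Mn)) fA (st, tl.take (tl.length - c * Mn))).2
          = tl.take (tl.length - (pvCopiesB tl (tl.length : Int) (Mn : Int) fB (c : Int)).toNat * Mn)
        ∧ ∃ K : Nat, pvCopiesB tl (tl.length : Int) (Mn : Int) fB (c : Int) = (K : Int)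
            ∧ c ≤ K ∧ K * Mn ≤ tl.length := by
  intro fA
  induction fA with
  | zero =>
    intro fB c st hc1 hcn hfA hfB
    have hnc : ¬ (((c : Int) + 1) * (Mn : Int) ≤ (tl.length : Int) ∧
        PySem.List.slice tl (some ((tl.length : Int) - ((c : Int) + 1) * (Mn : Int)))
            (some ((tl.length : Int) - (c : Int) * (Mn : Int)))
          = PySem.List.slice tl (some ((tl.length : Int) - (Mn : Int))) none) := by
      rintro ⟨h, -⟩
      have hd : (c + 1) * Mn = c * Mn + Mn := by ring
      have h2 : ((c : Int) + 1) * (Mn : Int) = ((c * Mn + Mn : Nat) : Int) := by push_cast; ring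
      rw [h2] at h
      have : c * Mn + Mn ≤ tl.length := by exact_mod_cast h
      have h1 : c ≤ c * Mn := Nat.le_mul_of_pos_right c hM
      omega
    have hB : pvCopiesB tl (tl.length : Int) (Mn : Int) fB (c : Int) = (c : Int) := by
      cases fB with
      | zero => rfl
      | succ fB => rw [pvCopiesB, if_neg hnc]
    rw [hB]
    exact ⟨by simp [pvStripA], c, rfl, le_rfl, hcn⟩
  | succ fA ih =>
    intro fB c st hc1 hcn hfA hfB
    by_cases hG : (((c : Int) + 1) * (Mn : Int) ≤ (tl.length : Int) ∧
        PySem.List.slice tl (some ((tl.length : Int) - ((c : Int) + 1) * (Mn : Int)))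
            (some ((tl.length : Int) - (c : Int) * (Mn : Int)))
          = PySem.List.slice tl (some ((tl.length : Int) - (Mn : Int))) none)
    · have hd : ((c : Int) + 1) * (Mn : Int) = ((c * Mn + Mn : Nat) : Int) := by push_cast; ring
      have hccsum : c * Mn + Mn ≤ tl.length := by
        have := hG.1
        rw [hd] at this
        exact_mod_cast this
      have hcc : (c + 1) * Mn ≤ tl.length := by
        have : (c + 1) * Mn = c * Mn + Mn := by ring
        omega
      have hcT : c + 1 ≤ tl.length := by
        have h1 : c ≤ c * Mn := Nat.le_mul_of_pos_right c hM
        omega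
      have hstep : pvStripA (Mn : Int) (tl.drop (tl.length - Mn)) (fA + 1)
            (st, tl.take (tl.length - c * Mn))
          = pvStripA (Mn : Int) (tl.drop (tl.length - Mn)) fA
            (PySem.List.slice st none (some (-(Mn : Int))),
             tl.take (tl.length - (c + 1) * Mn)) := by
        rw [pvStripA, if_pos ((pvStripGuard tl Mn c hM hMT hcn).mpr hG)]
        have hsl : PySem.List.slice (tl.take (tl.length - c * Mn)) none (some (-(Mn : Int)))
            = tl.take (tl.length - (c + 1) * Mn) := by
          rw [PySem.List.slice_to_neg_natCast _ Mn hM, List.take_take]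
          congr 1
          simp only [List.length_take]
          have : (c + 1) * Mn = c * Mn + Mn := by ring
          omega
        rw [hsl]
      cases fB with
      | zero => omega
      | succ fB =>
        have hBstep : pvCopiesB tl (tl.length : Int) (Mn : Int) (fB + 1) (c : Int)
            = pvCopiesB tl (tl.length : Int) (Mn : Int) fB ((c : Int) + 1) := by
          rw [pvCopiesB, if_pos hG]
        have hcast : ((c : Int) + 1) = ((c + 1 : Nat) : Int) := by push_cast; ring
        rw [hstep, hBstep, hcast]
        obtain ⟨h1, K, h2, h3, h4⟩ := ih fB (c + 1)
          (PySem.List.slice st none (some (-(Mn : Int)))) (by omega) hcc (by omega) (by omega)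
        exact ⟨h1, K, h2, by omega, h4⟩
    · have hB : pvCopiesB tl (tl.length : Int) (Mn : Int) fB (c : Int) = (c : Int) := by
        cases fB with
        | zero => rfl
        | succ fB => rw [pvCopiesB, if_neg hG]
      rw [pvStripA, if_neg]
      · rw [hB]
        exact ⟨by simp, c, rfl, le_rfl, hcn⟩
      · intro hE
        exact hG ((pvStripGuard tl Mn c hM hMT hcn).mp hE)

theorem pvFnp_some (t : List Char) (start e : Int) (h : pvFnp t start = some e) :
    start ≤ e ∧ e < (t.length : Int) := by
  have := List.mem_of_find?_eq_some h
  rwa [PySem.List.mem_pyRange_one] at this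

theorem pvSent_eq (tl repTail : List Char) :
    ∀ (fuel : Nat) (cur : List Char),
      ((pvSentA tl repTail fuel cur).length : Int)
        = pvSentB tl tl.reverse repTail fuel (cur.length : Int) := by
  intro fuel
  induction fuel with
  | zero => intro cur; rfl
  | succ fuel ih =>
    intro cur
    rw [pvSentA, pvSentB]
    cases hse : pvFnp tl (cur.length : Int) with
    | none => rfl
    | some e =>
      cases hss : pvFnp tl.reverse (cur.length : Int) with
      | none => rfl
      | some s =>
        simp only
        split
        · have he := pvFnp_some tl _ e hse
          have hlen : ((PySem.List.slice tl none (some (e + 1))).length : Int) = e + 1 := by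
            rw [PySem.List.slice_to _ (by omega)]
            simp only [List.length_take]
            omega
          split
          · exact hlen
          · rw [ih, hlen]
        · rfl

theorem pvMain (text : String) (min_len : Int) (hpre : 1 ≤ min_len) :
    truncate_repetitions text min_len = truncate_repetitions_alt text min_len := by
  unfold truncate_repetitions truncate_repetitions_alt
  simp only []
  set tx := text.toList with htx
  set tl := PySem.Chars.lower tx with htl
  by_cases hsz : (tl.length : Int) < 2 * min_len
  · rw [if_pos hsz, if_pos hsz]
  · rw [if_neg hsz, if_neg hsz]
    rw [← pvMaxRep_eq tl min_len hpre]
    cases hmr : pvMaxRepA tl (tl.length : Int) min_len with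
    | none => rfl
    | some M =>
      dsimp only
      -- facts about M
      have hfind := (pvMaxRep_eq tl min_len hpre).symm.trans hmr
      have hmem := List.mem_of_find?_eq_some hfind
      rw [List.mem_reverse, PySem.List.mem_pyRange_one] at hmem
      have hfd : PySem.Int.floordiv (tl.length : Int) 2 = ((tl.length / 2 : Nat) : Int) := by
        exact_mod_cast PySem.Int.floordiv_natCast tl.length 2
      obtain ⟨Mn, rfl⟩ : ∃ Mn : Nat, M = (Mn : Int) := ⟨M.toNat, by omega⟩
      have hM1 : 1 ≤ Mn := by exact_mod_cast hpre.trans hmem.1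
      have hMhalf : Mn < tl.length / 2 := by
        have := hmem.2
        rw [hfd] at this
        exact_mod_cast this
      have h2M : 2 * Mn < tl.length := by omega
      have hMT : Mn ≤ tl.length := by omega
      -- the lcs is the length-Mn suffix of tl
      have hlcs : PySem.List.slice tl (some (-(Mn : Int))) none = tl.drop (tl.length - Mn) :=
        PySem.List.slice_from_neg_natCast tl Mn hM1
      -- one unfolding of A's strip loop: the first endswith always succeeds
      have hstep0 : pvStripA (Mn : Int) (tl.drop (tl.length - Mn)) (tl.length + 1) (tx, tl)
          = pvStripA (Mn : Int) (tl.drop (tl.length - Mn)) tl.length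
              (PySem.List.slice tx none (some (-(Mn : Int))), tl.take (tl.length - 1 * Mn)) := by
        rw [pvStripA, if_pos]
        · congr 2
          rw [PySem.List.slice_to_neg_natCast tl Mn hM1]
          congr 1
          omega
        · rw [PySem.Chars.endswith_iff]
          exact List.drop_suffix _ _
      obtain ⟨hstrip, K, hKeq, hK1, hKT⟩ := pvStripCopies tl Mn hM1 hMT tl.length
        (tl.length + 1) 1 (PySem.List.slice tx none (some (-(Mn : Int))))
        le_rfl (by omega) (by omega) (by omega)
      have hone : ((1 : Nat) : Int) = (1 : Int) := rfl
      rw [hone] at hstrip hKeq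
      rw [hlcs, hstep0, hstrip, hKeq]
      have hKtoNat : ((K : Int)).toNat = K := Int.toNat_natCast K
      rw [hKtoNat]
      rw [pvSent_eq tl _ (tl.length + 1) (tl.take (tl.length - K * Mn))]
      have hcut : (((tl.take (tl.length - K * Mn)).length : Nat) : Int)
          = (tl.length : Int) - (K : Int) * (Mn : Int) := by
        have h1 : (tl.take (tl.length - K * Mn)).length = tl.length - K * Mn := by
          simp [List.length_take]
        rw [h1]
        push_cast [hKT]
        ring
      rw [hcut]

-- ===== VERDICT (by name: the statement is the Claim_ definition above) =====
theorem truncate_repetitions_spec : Claim_equal_truncate_repetitions := by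
  intro text min_len _hdom hpre
  unfold Spec_truncate_repetitions
  exact pvMain text min_len hpre
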